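-- pv_equiv track=rewrite | github.com/NabaviLab/SEACON | seacon/helpers.py | get_bins_per_chrom
-- ===== SOURCE A (Python) =====
-- def get_bins_per_chrom(coords):
--     num_bins_per_chrom = []
--     prev_chrom = None
--     for x in coords:
--         chrom = x[0]
--         if chrom != prev_chrom:
--             prev_chrom = chrom
--             num_bins_per_chrom.append(0)
--         num_bins_per_chrom[-1] += 1
--     return num_bins_per_chrom
-- ===== SOURCE B (Python) =====
-- def get_bins_per_chrom(coords):
--     n = len(coords)
--     bounds = [i for i in range(n) if i == 0 or coords[i][0] != coords[i - 1][0]]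
--     bounds.append(n)
--     return [b - a for a, b in zip(bounds, bounds[1:])]
-- ===== Notes on version B (the rewrite author's own statement) =====
-- stated objective: alternative
-- what changed: Instead of A's stateful single pass (prev-chromosome tracking, appending 0 and incrementing the last list element per item), B works in staged passes: it first computes the list of run-boundary indices (positions where the chromosome changes, plus 0 and n) by neighbour comparison, then emits the pairwise differences of that boundary list.
import Mathlib
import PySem

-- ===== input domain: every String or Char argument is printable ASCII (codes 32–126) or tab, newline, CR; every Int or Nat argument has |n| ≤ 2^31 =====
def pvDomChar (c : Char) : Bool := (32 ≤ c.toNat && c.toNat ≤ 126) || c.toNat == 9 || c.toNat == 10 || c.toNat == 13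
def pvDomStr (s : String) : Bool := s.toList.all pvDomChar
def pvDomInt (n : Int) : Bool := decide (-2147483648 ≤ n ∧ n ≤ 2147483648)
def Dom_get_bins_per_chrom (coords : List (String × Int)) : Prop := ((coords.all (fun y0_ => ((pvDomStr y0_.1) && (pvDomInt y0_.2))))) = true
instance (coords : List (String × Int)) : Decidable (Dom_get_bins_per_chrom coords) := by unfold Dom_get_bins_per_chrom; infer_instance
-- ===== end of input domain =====

-- B replaces A's stateful pass (prev-chromosome, append 0, increment last) with staged passes:
-- collect run-boundary indices by neighbour comparison, then take pairwise differences.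


-- ===== PORT A =====
-- nums[-1] += 1; inside the loop nums is always nonempty (a 0 was appended first), so the
-- empty case of incLast is never reached.
def incLast : List Int → List Int
  | [] => []
  | [a] => [a + 1]
  | a :: t => a :: incLast t

def stepA (st : List Int × Option String) (x : String × Int) : List Int × Option String :=
  let st' := if some x.1 ≠ st.2 then (st.1 ++ [(0 : Int)], some x.1) else st
  (incLast st'.1, st'.2)

def get_bins_per_chrom (coords : List (String × Int)) : List Int :=
  (coords.foldl stepA ([], none)).1

-- ===== PORT B =====
-- the comprehension's condition: i == 0 or coords[i][0] != coords[i-1][0]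
-- (both indexings are in range and non-negative whenever evaluated, so getD is exact)
def bndCond (coords : List (String × Int)) (i : Nat) : Bool :=
  i == 0 || !((coords.getD i ("", 0)).1 == (coords.getD (i - 1) ("", 0)).1)

-- [b - a for a, b in zip(bounds, bounds[1:])]
def zd (l : List Nat) : List Int :=
  (l.zip l.tail).map (fun p => (p.2 : Int) - (p.1 : Int))

def get_bins_per_chrom_alt (coords : List (String × Int)) : List Int :=
  let n := coords.length
  let bounds := (List.range n).filter (bndCond coords)
  zd (bounds ++ [n])

-- ===== PRECONDITION & SPEC =====
def Spec_get_bins_per_chrom (coords : List (String × Int)) (out : List Int) : Prop := out = get_bins_per_chrom_alt coords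
instance (coords : List (String × Int)) (out : List Int) : Decidable (Spec_get_bins_per_chrom coords out) := by unfold Spec_get_bins_per_chrom; infer_instance

-- ===== CLAIM (what is proved, stated in full; the proofs are below) =====
def Claim_equal_get_bins_per_chrom : Prop := ∀ (coords : List (String × Int)), Dom_get_bins_per_chrom coords → Spec_get_bins_per_chrom coords (get_bins_per_chrom coords)

-- ===== LEMMAS AND PROOFS =====

-- proof-only canonical run-length list via takeWhile/dropWhile
def altTake : List (String × Int) → List Int
  | [] => []
  | (c, _) :: t =>
    (1 + ((t.takeWhile (fun y => y.1 == c)).length : Int)) :: altTake (t.dropWhile (fun y => y.1 == c))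
termination_by l => l.length
decreasing_by
  have := List.length_dropWhile_le (fun (y : String × Int) => y.1 == c) t
  simp; omega

-- ---- A-side: fold = altTake ----
theorem incLast_append (l : List Int) (a : Int) : incLast (l ++ [a]) = l ++ [a + 1] := by
  induction l with
  | nil => rfl
  | cons x t ih =>
    cases t with
    | nil => rfl
    | cons y s => simpa [incLast] using ih

theorem foldA (t : List (String × Int)) (init : List Int) (k : Int) (c : String) :
    (t.foldl stepA (init ++ [k], some c)).1 =
      init ++ (k + ((t.takeWhile (fun y => y.1 == c)).length : Int))
        :: altTake (t.dropWhile (fun y => y.1 == c)) := by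
  induction t generalizing init k c with
  | nil => simp [altTake]
  | cons x t' ih =>
    obtain ⟨c', v⟩ := x
    by_cases hc : c' = c
    · subst hc
      have hstep : stepA (init ++ [k], some c') (c', v) = (init ++ [k + 1], some c') := by
        simp [stepA, incLast_append]
      rw [List.foldl_cons, hstep, ih]
      simp
      ring_nf
    · have hne : (c' == c) = false := by simp [hc]
      have hstep : stepA (init ++ [k], some c) (c', v) = ((init ++ [k]) ++ [(1 : Int)], some c') := by
        have h0 : incLast ((init ++ [k]) ++ [(0 : Int)]) = (init ++ [k]) ++ [(0 : Int) + 1] :=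
          incLast_append (init ++ [k]) 0
        simp at h0
        simp [stepA, hc, h0]
      rw [List.foldl_cons, hstep, ih]
      simp [hne, altTake]

theorem getA_altTake (coords : List (String × Int)) :
    get_bins_per_chrom coords = altTake coords := by
  unfold get_bins_per_chrom
  cases coords with
  | nil => simp [altTake]
  | cons x t =>
    obtain ⟨c, v⟩ := x
    have hstep : stepA ([], none) (c, v) = ([] ++ [(1 : Int)], some c) := by
      simp [stepA, incLast]
    rw [List.foldl_cons, hstep, foldA]
    simp [altTake]

-- ---- B-side: boundaries + diffs = altTake ----

theorem drop_takeWhile_len (p : String × Int → Bool) (l : List (String × Int)) :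
    l.drop (l.takeWhile p).length = l.dropWhile p := by
  nth_rewrite 2 [← List.takeWhile_append_dropWhile (p := p) (l := l)]
  rw [List.drop_left]

theorem zd_cons_cons (a b : Nat) (s : List Nat) :
    zd (a :: b :: s) = ((b : Int) - (a : Int)) :: zd (b :: s) := by
  simp [zd]

theorem zd_map_add (r : Nat) (l : List Nat) : zd (l.map (r + ·)) = zd l := by
  induction l with
  | nil => rfl
  | cons a t ih =>
    cases t with
    | nil => rfl
    | cons b s =>
      rw [List.map_cons, List.map_cons, zd_cons_cons, zd_cons_cons]
      rw [← List.map_cons, ih]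
      congr 1
      push_cast
      ring

-- filter of range with predicate true only at 0
theorem filter_range_zero (q : Nat → Bool) (n : Nat) (hn : 1 ≤ n)
    (h0 : q 0 = true) (h : ∀ i, 1 ≤ i → i < n → q i = false) :
    (List.range n).filter q = [0] := by
  obtain ⟨m, rfl⟩ : ∃ m, n = m + 1 := ⟨n - 1, by omega⟩
  rw [List.range_succ_eq_map, List.filter_cons_of_pos h0, List.filter_map]
  rw [List.filter_eq_nil_iff.mpr]
  · rfl
  · intro a ha
    have hm : a < m := List.mem_range.mp ha
    simp only [Function.comp]
    simp [h (Nat.succ a) (by omega) (by omega)]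

-- bounds ++ [n] always starts with 0
theorem bounds2_head (coords : List (String × Int)) :
    ∃ s, (List.range coords.length).filter (bndCond coords) ++ [coords.length] = 0 :: s := by
  cases coords with
  | nil => exact ⟨[], rfl⟩
  | cons x t =>
    rw [List.length_cons, List.range_succ_eq_map,
        List.filter_cons_of_pos (by simp [bndCond])]
    exact ⟨_, rfl⟩

-- getD through drop, in range
theorem getD_drop' (l : List (String × Int)) (r j : Nat) (h : j < (l.drop r).length) :
    (l.drop r).getD j ("", 0) = l.getD (r + j) ("", 0) := by
  have h2 : r + j < l.length := by simp at h; omega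
  rw [List.getD_eq_getElem _ _ h, List.getD_eq_getElem _ _ h2, List.getElem_drop]

-- elements of the first run all share the head's chromosome
theorem run_getD (c : String) (v : Int) (t : List (String × Int)) (i : Nat)
    (hi : i < 1 + (t.takeWhile (fun y => y.1 == c)).length) :
    (((c, v) :: t).getD i ("", 0)).1 = c := by
  cases i with
  | zero => simp
  | succ j =>
    have hj : j < (t.takeWhile (fun y => y.1 == c)).length := by omega
    have hpre : t.takeWhile (fun y => y.1 == c) <+: t := List.takeWhile_prefix _
    have hjt : j < t.length := lt_of_lt_of_le hj hpre.length_le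
    have hget : t.getD j ("", 0) = (t.takeWhile (fun y => y.1 == c))[j] := by
      rw [List.getD_eq_getElem _ _ hjt]; exact (hpre.getElem hj).symm
    have hmem : (t.takeWhile (fun y => y.1 == c))[j] ∈ t.takeWhile (fun y => y.1 == c) :=
      List.getElem_mem hj
    have hb := List.mem_takeWhile_imp hmem
    have hval : ((t.takeWhile (fun y => y.1 == c))[j]).1 = c := eq_of_beq hb
    simp only [List.getD_cons_succ]
    rw [hget, hval]

-- the key decomposition: the boundary list of l is 0 followed by the boundary list of the
-- tail after the first run, each index shifted by the first run's length
theorem bnd_decomp (c : String) (v : Int) (t : List (String × Int)) :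
    (List.range ((c, v) :: t).length).filter (bndCond ((c, v) :: t)) =
      0 :: ((List.range (t.dropWhile (fun y => y.1 == c)).length).filter
              (bndCond (t.dropWhile (fun y => y.1 == c)))).map
            ((1 + (t.takeWhile (fun y => y.1 == c)).length) + ·) := by
  set w := t.takeWhile (fun y => y.1 == c) with hw
  set d := t.dropWhile (fun y => y.1 == c) with hd
  set r := 1 + w.length with hr
  have hwl : (t.takeWhile (fun y => y.1 == c)).length = w.length := rfl
  have htlen : w.length + d.length = t.length := by
    rw [hw, hd, ← List.length_append, List.takeWhile_append_dropWhile]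
  have hn : ((c, v) :: t).length = r + d.length := by
    simp only [List.length_cons]; omega
  have hld : ((c, v) :: t).drop r = d := by
    have h1 : ((c, v) :: t).drop (w.length + 1) = t.drop w.length := List.drop_succ_cons
    rw [hr, Nat.add_comm 1 w.length, h1, hw, drop_takeWhile_len]
  have hdd : ∀ j, j < d.length → d.getD j ("", 0) = ((c, v) :: t).getD (r + j) ("", 0) := by
    intro j hj
    rw [← hld, getD_drop']
    rw [hld]; exact hj
  rw [hn, List.range_add, List.filter_append]
  have h1 : (List.range r).filter (bndCond ((c, v) :: t)) = [0] := by
    apply filter_range_zero _ _ (by omega)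
    · simp [bndCond]
    · intro i h1i hir
      have ha : (((c, v) :: t).getD i ("", 0)).1 = c := run_getD c v t i (by omega)
      have hb : (((c, v) :: t).getD (i - 1) ("", 0)).1 = c := run_getD c v t (i - 1) (by omega)
      have hne0 : (i == 0) = false := by simp; omega
      have heq : ((((c, v) :: t).getD i ("", 0)).1 == (((c, v) :: t).getD (i - 1) ("", 0)).1) = true := by
        rw [ha, hb]; simp
      simp only [bndCond, hne0, heq]
      rfl
  rw [h1, List.filter_map]
  have h2 : (List.range d.length).filter (bndCond ((c, v) :: t) ∘ (fun x => r + x)) =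
      (List.range d.length).filter (bndCond d) := by
    apply List.filter_congr
    intro j hj
    have hjm : j < d.length := List.mem_range.mp hj
    simp only [Function.comp]
    cases j with
    | zero =>
      have hne0 : (r + 0 == 0) = false := by simp; omega
      have hgr : ((c, v) :: t).getD (r + 0) ("", 0) = d.getD 0 ("", 0) := (hdd 0 hjm).symm
      have hprev : (((c, v) :: t).getD (r + 0 - 1) ("", 0)).1 = c := by
        have he : r + 0 - 1 = w.length := by omega
        rw [he]; exact run_getD c v t w.length (by omega)
      have hdne : d ≠ [] := List.ne_nil_of_length_pos hjm
      have hhead : (((d.head hdne)).1 == c) = false :=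
        List.head_dropWhile_not (fun y : String × Int => y.1 == c) hdne
      have hg0 : d.getD 0 ("", 0) = d.head hdne := by
        rw [List.getD_eq_getElem _ _ hjm, List.head_eq_getElem]
      simp only [bndCond, hne0, hgr, hg0, hprev, hhead]
      simp
    | succ j' =>
      have hne0 : (r + (j' + 1) == 0) = false := by simp
      have hgr : ((c, v) :: t).getD (r + (j' + 1)) ("", 0) = d.getD (j' + 1) ("", 0) :=
        (hdd (j' + 1) hjm).symm
      have hgp : ((c, v) :: t).getD (r + (j' + 1) - 1) ("", 0) = d.getD (j' + 1 - 1) ("", 0) := by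
        have ha : r + (j' + 1) - 1 = r + j' := by omega
        have hb : j' + 1 - 1 = j' := by omega
        rw [ha, hb, ← hdd j' (by omega)]
      have hne0' : (j' + 1 == 0) = false := by simp
      simp only [bndCond, hne0, hne0', hgr, hgp]
  rw [h2]
  rfl

theorem altB (coords : List (String × Int)) :
    get_bins_per_chrom_alt coords = altTake coords := by
  fun_induction altTake coords with
  | case1 => rfl
  | case2 c v t ih =>
    set w := t.takeWhile (fun y => y.1 == c) with hw
    set d := t.dropWhile (fun y => y.1 == c) with hd
    set r := 1 + w.length with hr
    have htlen : w.length + d.length = t.length := by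
      rw [hw, hd, ← List.length_append, List.takeWhile_append_dropWhile]
    have hn : ((c, v) :: t).length = r + d.length := by
      simp only [List.length_cons]; omega
    show zd ((List.range ((c, v) :: t).length).filter (bndCond ((c, v) :: t)) ++
        [((c, v) :: t).length]) = _
    rw [bnd_decomp, hn]
    obtain ⟨s, hs⟩ := bounds2_head d
    have hmapapp : ((List.range d.length).filter (bndCond d)).map (r + ·) ++ [r + d.length] =
        ((List.range d.length).filter (bndCond d) ++ [d.length]).map (r + ·) := by
      rw [List.map_append]; rfl
    have hgd : zd ((List.range d.length).filter (bndCond d) ++ [d.length]) = altTake d := by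
      rw [← ih]; rfl
    rw [List.cons_append, hmapapp, hs, List.map_cons]
    rw [zd_cons_cons, ← List.map_cons, zd_map_add, ← hs, hgd]
    have hv : ((r + 0 : Nat) : Int) - ((0 : Nat) : Int) = 1 + (w.length : Int) := by
      rw [hr]; push_cast; ring
    rw [hv]

-- ===== VERDICT (by name: the statement is the Claim_ definition above) =====
theorem get_bins_per_chrom_spec : Claim_equal_get_bins_per_chrom := by
  intro coords _
  unfold Spec_get_bins_per_chrom
  rw [getA_altTake, altB]
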